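-- pv_equiv track=rewrite | github.com/Cheerfulmoss/CodeJam2024 | alien language/make test.py | to_alien
-- ===== SOURCE A (Python) =====
-- from string import ascii_letters
--
-- def to_alien(sentence: str):
--     alien_sentence = []
--     for char in sentence:
--         letter = []
--         value = ord(char)
--         for x in range(len(ascii_letters) - 1, -1, -1):
--             alien_value = ascii_letters[x]
--             x += 1
--             if x <= value:
--                 letter.append(alien_value)
--                 value -= x
--         alien_sentence.append("".join(letter))
--
--     return " ".join(alien_sentence)
-- ===== SOURCE B (Python) =====
-- from string import ascii_letters
--
-- # Sum of the f largest weights 52, 51, ..., 53-f  (triangular prefix sums).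
-- _T = [f * (105 - f) // 2 for f in range(53)]
--
-- def _encode(v):
--     # The greedy decomposition emits the weights 52, 51, ..., 53-f in full,
--     # where f is the largest index with _T[f] <= v (found by binary search),
--     # followed by one residual letter for r = v - _T[f] if any weight is left.
--     lo, hi = 0, 52
--     while lo < hi:
--         mid = (lo + hi + 1) // 2
--         if _T[mid] <= v:
--             lo = mid
--         else:
--             hi = mid - 1
--     s = ascii_letters[52 - lo:][::-1]
--     r = v - _T[lo]
--     if lo < 52 and r > 0:
--         s += ascii_letters[r - 1]
--     return s
--
-- def to_alien(sentence: str):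
--     return " ".join(_encode(ord(c)) for c in sentence)
-- ===== Notes on version B (the rewrite author's own statement) =====
-- stated objective: alternative
-- what changed: B replaces A's per-character greedy subtraction scan over all 52 weights by a closed-form characterisation: the greedy output is a run of full weights 52..53-f plus one residual letter, where f is found by binary search over precomputed triangular prefix sums.
import Mathlib
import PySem

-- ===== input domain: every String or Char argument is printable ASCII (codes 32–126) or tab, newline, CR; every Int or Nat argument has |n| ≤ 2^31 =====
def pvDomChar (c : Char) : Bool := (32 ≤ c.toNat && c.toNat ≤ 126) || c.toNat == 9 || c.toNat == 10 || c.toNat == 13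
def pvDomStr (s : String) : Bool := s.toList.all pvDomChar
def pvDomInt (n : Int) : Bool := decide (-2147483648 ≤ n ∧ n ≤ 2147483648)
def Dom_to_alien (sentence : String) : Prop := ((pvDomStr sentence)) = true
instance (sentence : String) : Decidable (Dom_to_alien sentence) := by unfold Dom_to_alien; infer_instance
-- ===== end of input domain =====

-- B replaces A's greedy 52-weight subtraction scan per character by a closed form:
-- full weights 52..53-f (f found by binary search over triangular prefix sums) plus
-- one residual letter; objective: alternative algorithm.

-- ===== PORT A =====
-- string.ascii_letters
def asciiLetters : List Char := "abcdefghijklmnopqrstuvwxyzABCDEFGHIJKLMNOPQRSTUVWXYZ".toList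

-- inner loop of A for one character: for x in range(51, -1, -1): …
def encA (value : Int) : List Char :=
  ((PySem.List.pyRange 51 (-1) (-1)).foldl (fun (st : List Char × Int) x =>
      let alien_value := PySem.List.pyGetD asciiLetters x ' '   -- ascii_letters[x]; x always in 0..51 here
      let x := x + 1
      if x ≤ st.2 then (st.1 ++ [alien_value], st.2 - x) else st)
    ([], value)).1

def to_alien (sentence : String) : String :=
  let alien_sentence :=
    sentence.toList.foldl (fun acc char => acc ++ [encA (char.toNat : Int)]) ([] : List (List Char))
  String.ofList (PySem.Chars.join [' '] alien_sentence)

-- ===== PORT B =====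
-- _T = [f * (105 - f) // 2 for f in range(53)]
def tblT : List Nat := (List.range 53).map (fun f => f * (105 - f) / 2)

-- B's binary-search while loop 'while lo < hi: …'; each step strictly shrinks hi - lo,
-- so fuel := hi - lo + 1 (53 at the top call) runs it to completion; structural fuel
-- keeps it kernel-reducible.
def bsearch : Nat → Nat → Nat → Nat → Nat
  | 0, lo, _, _ => lo
  | fuel + 1, lo, hi, v =>
    if lo < hi then
      let mid := (lo + hi + 1) / 2
      if tblT.getD mid 0 ≤ v then bsearch fuel mid hi v
      else bsearch fuel lo (mid - 1) v
    else lo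

def encB (v : Nat) : List Char :=
  let lo := bsearch 53 0 52 v
  -- ascii_letters[52 - lo:][::-1]; 52 - lo is a nonnegative in-range index, so the
  -- Python slice-from is exactly List.drop
  let s := (asciiLetters.drop (52 - lo)).reverse
  let r := v - tblT.getD lo 0
  if lo < 52 ∧ 0 < r then s ++ [asciiLetters.getD (r - 1) ' '] else s

def to_alien_alt (sentence : String) : String :=
  String.ofList (PySem.Chars.join [' '] (sentence.toList.map (fun c => encB c.toNat)))

-- ===== PRECONDITION & SPEC =====
def Spec_to_alien (sentence : String) (out : String) : Prop := out = to_alien_alt sentence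
instance (sentence : String) (out : String) : Decidable (Spec_to_alien sentence out) := by unfold Spec_to_alien; infer_instance

-- ===== CLAIM (what is proved, stated in full; the proofs are below) =====
def Claim_equal_to_alien : Prop := ∀ (sentence : String), Dom_to_alien sentence → Spec_to_alien sentence (to_alien sentence)

-- ===== LEMMAS AND PROOFS =====

set_option maxRecDepth 4000 in
set_option maxHeartbeats 1000000 in
theorem encA_eq_encB_fin : ∀ n : Fin 127, encA (n.val : Int) = encB n.val := by decide

theorem domChar_lt (c : Char) (h : pvDomChar c = true) : c.toNat < 127 := by
  simp [pvDomChar] at h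
  omega

-- ===== VERDICT (by name: the statement is the Claim_ definition above) =====
theorem to_alien_spec : Claim_equal_to_alien := by
  intro s hdom
  unfold Spec_to_alien to_alien to_alien_alt
  simp only [PySem.List.foldl_append_singleton_eq_map, List.nil_append]
  have hmap : s.toList.map (fun char => encA (char.toNat : Int))
      = s.toList.map (fun c => encB c.toNat) := by
    apply List.map_congr_left
    intro c hc
    have hd : pvDomChar c = true := by
      have := hdom
      unfold Dom_to_alien pvDomStr at this
      exact (List.all_eq_true.mp this) c hc
    exact encA_eq_encB_fin ⟨c.toNat, domChar_lt c hd⟩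
  rw [hmap]
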